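-- pv_equiv track=rewrite | github.com/squizzster/check_linux_permissions | check_permissions.py | unescape_mount_field
-- ===== SOURCE A (Python) =====
-- from typing import Callable, Dict, Iterable, Iterator, List, Optional, Sequence, Set, Tuple, TypeVar
--
-- def unescape_mount_field(s: str) -> str:
--     out: List[str] = []
--     i = 0
--     while i < len(s):
--         if s[i] == "\\" and i + 3 < len(s) and all(c in "01234567" for c in s[i + 1 : i + 4]):
--             out.append(chr(int(s[i + 1 : i + 4], 8)))
--             i += 4
--         else:
--             out.append(s[i])
--             i += 1
--     return "".join(out)
-- ===== SOURCE B (Python) =====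
-- def unescape_mount_field(s: str) -> str:
--     parts = s.split("\\")
--     out = [parts[0]]
--     for p in parts[1:]:
--         if len(p) >= 3 and all(c in "01234567" for c in p[:3]):
--             out.append(chr(int(p[:3], 8)) + p[3:])
--         else:
--             out.append("\\" + p)
--     return "".join(out)
-- ===== Notes on version B (the rewrite author's own statement) =====
-- stated objective: simpler
-- what changed: B replaces A's index-stepping while loop (manual lookahead and i+=4 skips) by splitting the string on backslash once and decoding each subsequent piece's 3-octal-digit prefix.
import Mathlib
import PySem

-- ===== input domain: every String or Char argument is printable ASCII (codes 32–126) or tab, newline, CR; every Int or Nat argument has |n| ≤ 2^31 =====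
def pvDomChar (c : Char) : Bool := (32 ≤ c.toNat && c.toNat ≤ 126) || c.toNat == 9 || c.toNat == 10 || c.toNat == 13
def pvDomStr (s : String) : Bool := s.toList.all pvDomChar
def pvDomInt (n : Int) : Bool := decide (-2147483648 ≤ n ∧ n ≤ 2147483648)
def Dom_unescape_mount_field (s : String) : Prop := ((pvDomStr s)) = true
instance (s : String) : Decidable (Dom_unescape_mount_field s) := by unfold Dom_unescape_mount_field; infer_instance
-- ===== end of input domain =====

-- B replaces A's index-stepping while loop by splitting on backslash and decoding
-- each piece's 3-octal-digit prefix (objective: simpler/idiomatic; not faster).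

-- shared small helpers, mirroring the identical Python subexpressions of A and B:
-- `c in "01234567"`
def pvOct (c : Char) : Bool := ['0','1','2','3','4','5','6','7'].contains c
-- `int(t, 8)` for a string t of octal digits (exact on that domain, which both guards ensure)
def pvOctVal (t : List Char) : Nat := t.foldl (fun a c => a * 8 + (c.toNat - 48)) 0

-- ===== PORT A =====
def pvGoA (cs : List Char) (i : Nat) (out : List Char) : List Char :=
  if h : i < cs.length then
    if cs[i] = '\\' ∧ i + 3 < cs.length ∧ ((cs.drop (i + 1)).take 3).all pvOct then
      pvGoA cs (i + 4) (out ++ [Char.ofNat (pvOctVal ((cs.drop (i + 1)).take 3))])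
    else
      pvGoA cs (i + 1) (out ++ [cs[i]])
  else out
termination_by cs.length - i
decreasing_by all_goals omega

def unescape_mount_field (s : String) : String := String.ofList (pvGoA s.toList 0 [])

-- ===== PORT B =====
-- `s.split("\\")` (ported by hand, step for step; exact for the one-char separator '\')
def pvSplitBS : List Char → List (List Char)
  | [] => [[]]
  | c :: rest =>
    if c = '\\' then [] :: pvSplitBS rest
    else
      match pvSplitBS rest with
      | p :: ps => (c :: p) :: ps
      | [] => [[c]]

-- the body of B's for-loop: what gets appended for a piece p of parts[1:]
def pvProcB (p : List Char) : List Char :=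
  if 3 ≤ p.length ∧ (p.take 3).all pvOct then
    Char.ofNat (pvOctVal (p.take 3)) :: p.drop 3
  else '\\' :: p

def unescape_mount_field_alt (s : String) : String :=
  String.ofList ((pvSplitBS s.toList).headI ++ ((pvSplitBS s.toList).tail).flatMap pvProcB)

-- ===== PRECONDITION & SPEC =====
def Spec_unescape_mount_field (s : String) (out : String) : Prop := out = unescape_mount_field_alt s
instance (s : String) (out : String) : Decidable (Spec_unescape_mount_field s out) := by unfold Spec_unescape_mount_field; infer_instance

-- ===== CLAIM (what is proved, stated in full; the proofs are below) =====
def Claim_equal_unescape_mount_field : Prop := ∀ (s : String), Dom_unescape_mount_field s → Spec_unescape_mount_field s (unescape_mount_field s)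

-- ===== LEMMAS AND PROOFS =====

-- functional characterisation of A's loop
def pvFA : List Char → List Char
  | [] => []
  | c :: rest =>
    if c = '\\' ∧ 3 ≤ rest.length ∧ (rest.take 3).all pvOct then
      Char.ofNat (pvOctVal (rest.take 3)) :: pvFA (rest.drop 3)
    else c :: pvFA rest
termination_by cs => cs.length
decreasing_by all_goals simp

lemma pvOct_ne_bs {c : Char} (h : pvOct c = true) : c ≠ '\\' := by
  intro e; subst e; exact absurd h (by decide)

lemma pvSplitBS_ne_nil (cs : List Char) : pvSplitBS cs ≠ [] := by
  cases cs with
  | nil => simp [pvSplitBS]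
  | cons c rest =>
    by_cases hc : c = '\\' <;> simp [pvSplitBS, hc]
    split <;> simp

lemma pvSplitBS_cons (c : Char) (rest : List Char) (hc : c ≠ '\\') :
    pvSplitBS (c :: rest) = (c :: (pvSplitBS rest).headI) :: (pvSplitBS rest).tail := by
  obtain ⟨p, ps, h⟩ := List.exists_cons_of_ne_nil (pvSplitBS_ne_nil rest)
  simp [pvSplitBS, hc, h]

lemma pvSplitBS_headI_prefix : ∀ cs : List Char, (pvSplitBS cs).headI <+: cs
  | [] => by simp [pvSplitBS]
  | c :: rest => by
    by_cases hc : c = '\\'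
    · simp [pvSplitBS, hc]
    · rw [pvSplitBS_cons c rest hc]
      exact List.cons_prefix_cons.mpr ⟨rfl, pvSplitBS_headI_prefix rest⟩

lemma pvGoA_eq_fA (cs : List Char) (i : Nat) (out : List Char) :
    pvGoA cs i out = out ++ pvFA (cs.drop i) := by
  fun_induction pvGoA cs i out with
  | case1 i out h cond ih =>
    have hd : cs.drop i = cs[i] :: cs.drop (i + 1) := (List.getElem_cons_drop h).symm
    rw [ih, hd, pvFA]
    have h3 : 3 ≤ (cs.drop (i + 1)).length := by simp; omega
    rw [if_pos ⟨cond.1, h3, cond.2.2⟩, List.drop_drop]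
    simp
  | case2 i out h cond ih =>
    have hd : cs.drop i = cs[i] :: cs.drop (i + 1) := (List.getElem_cons_drop h).symm
    rw [ih, hd, pvFA]
    have hcond : ¬ (cs[i] = '\\' ∧ 3 ≤ (cs.drop (i + 1)).length ∧ ((cs.drop (i + 1)).take 3).all pvOct) := by
      intro ⟨h1, h2, h3⟩
      exact cond ⟨h1, by simp at h2; omega, h3⟩
    rw [if_neg hcond]
    simp
  | case3 i out h =>
    rw [List.drop_of_length_le (by omega), pvFA]
    simp

lemma pvGB_eq_fA (cs : List Char) :
    (pvSplitBS cs).headI ++ ((pvSplitBS cs).tail).flatMap pvProcB = pvFA cs := by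
  fun_induction pvFA cs with
  | case1 => simp [pvSplitBS]
  | case2 c rest cond ih =>
    obtain ⟨hc, hlen, hoct⟩ := cond
    subst hc
    match rest, hlen, hoct, ih with
    | a :: b :: d :: r', _, hoct, ih =>
      have htk : (a :: b :: d :: r').take 3 = [a, b, d] := rfl
      rw [htk] at hoct ⊢
      have hdr : (a :: b :: d :: r').drop 3 = r' := rfl
      rw [hdr] at ih ⊢
      simp only [List.all_cons, List.all_nil, Bool.and_eq_true, and_true] at hoct
      obtain ⟨ha, hb, hd'⟩ := hoct
      rw [show pvSplitBS ('\\' :: a :: b :: d :: r') = [] :: pvSplitBS (a :: b :: d :: r') from rfl]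
      rw [pvSplitBS_cons a _ (pvOct_ne_bs ha), pvSplitBS_cons b _ (pvOct_ne_bs hb),
          pvSplitBS_cons d _ (pvOct_ne_bs hd')]
      simp only [List.headI_cons, List.tail_cons, List.flatMap_cons, List.nil_append]
      have hg : 3 ≤ (a :: b :: d :: (pvSplitBS r').headI).length ∧
          ((a :: b :: d :: (pvSplitBS r').headI).take 3).all pvOct := by
        refine ⟨by simp, ?_⟩
        rw [show (a :: b :: d :: (pvSplitBS r').headI).take 3 = [a, b, d] from rfl]
        simp [ha, hb, hd']
      rw [pvProcB, if_pos hg]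
      rw [show (a :: b :: d :: (pvSplitBS r').headI).take 3 = [a, b, d] from rfl,
          show (a :: b :: d :: (pvSplitBS r').headI).drop 3 = (pvSplitBS r').headI from rfl]
      rw [List.cons_append, ih]
  | case3 c rest cond ih =>
    by_cases hc : c = '\\'
    · subst hc
      rw [show pvSplitBS ('\\' :: rest) = [] :: pvSplitBS rest from rfl]
      obtain ⟨p, ps, h⟩ := List.exists_cons_of_ne_nil (pvSplitBS_ne_nil rest)
      have hp : p = (pvSplitBS rest).headI := by rw [h]; rfl
      have hps : ps = (pvSplitBS rest).tail := by rw [h]; rfl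
      have hpre : p <+: rest := hp ▸ pvSplitBS_headI_prefix rest
      have hguard : ¬ (3 ≤ p.length ∧ (p.take 3).all pvOct) := by
        intro ⟨h1, h2⟩
        obtain ⟨t, ht⟩ := hpre
        refine cond ⟨rfl, ?_, ?_⟩
        · rw [← ht]; simp; omega
        · rw [← ht, List.take_append_of_le_length h1]; exact h2
      rw [h]
      simp only [List.headI_cons, List.tail_cons, List.flatMap_cons, List.nil_append]
      rw [pvProcB, if_neg hguard, hp, hps]
      rw [List.cons_append, ih]
    · rw [pvSplitBS_cons c rest hc]
      simp only [List.headI_cons, List.tail_cons]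
      rw [List.cons_append, ih]

-- ===== VERDICT (by name: the statement is the Claim_ definition above) =====
theorem unescape_mount_field_spec : Claim_equal_unescape_mount_field := by
  intro s _
  unfold Spec_unescape_mount_field unescape_mount_field unescape_mount_field_alt
  rw [pvGoA_eq_fA, pvGB_eq_fA]
  simp
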